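-- pv_equiv track=rewrite | github.com/depaolibio/100-Days-of-code-exercises | Day7 - Game - Hangman simple - 1 player.py | find_all_occurrences_loop
-- ===== SOURCE A (Python) =====
-- def find_all_occurrences_loop(text, char):
--     positions = []
--     start_index = 0
--     while True:
--         index = text.find(char, start_index)
--         if index == -1:  # Character not found
--             break
--         positions.append(index)
--         start_index = index + 1  # Start searching from the next position
--     return positions
-- ===== SOURCE B (Python) =====
-- def find_all_occurrences_loop(text, char):
--     n = len(char)
--     return [i for i in range(len(text)) if text[i:i+n] == char]
-- ===== Notes on version B (the rewrite author's own statement) =====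
-- stated objective: simpler
-- what changed: Replaces the while-loop of repeated text.find calls with an advancing start index by a one-line comprehension that compares the slice text[i:i+len(char)] with char at every index; Pre_ excludes the empty search string, a corner where the number of 'occurrences' is pure convention (A yields every index 0..len(text) including the one past the end, B yields 0..len(text)-1).
-- outside the precondition, e.g. on find_all_occurrences_loop('ab', ''): A returns [0, 1, 2], B returns [0, 1]
import Mathlib
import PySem

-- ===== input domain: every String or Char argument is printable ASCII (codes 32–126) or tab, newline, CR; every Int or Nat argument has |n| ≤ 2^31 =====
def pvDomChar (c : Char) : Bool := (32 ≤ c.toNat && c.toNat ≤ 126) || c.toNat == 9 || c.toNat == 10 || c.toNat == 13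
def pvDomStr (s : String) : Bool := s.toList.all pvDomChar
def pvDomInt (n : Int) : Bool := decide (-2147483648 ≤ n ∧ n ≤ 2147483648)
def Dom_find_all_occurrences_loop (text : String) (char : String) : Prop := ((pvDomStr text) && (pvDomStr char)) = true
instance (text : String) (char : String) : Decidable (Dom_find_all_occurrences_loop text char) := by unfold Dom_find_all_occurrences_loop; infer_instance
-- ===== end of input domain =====

-- B replaces A's repeated text.find by a per-index slice comparison (simpler, one comprehension).

-- ===== PORT A =====
-- A start index strictly above the length makes findFrom return -1 (CPython behaviour, kept by PySem);
-- the loop needs this fact for termination, so it is stated above the port and cited in decreasing_by.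
theorem pvFindFrom_of_gt (t c : List Char) (start : Nat) (h : t.length < start) :
    PySem.Chars.findFrom t c (start : Int) none = -1 := by
  simp only [PySem.Chars.findFrom]
  have : ((t.length : Int)) < (start : Int) := by exact_mod_cast h
  have hnn : ¬ ((start : Int) < 0) := by omega
  simp [hnn, this]

-- Bounds on a successful findFrom, used only for termination of the loop below.
theorem pvFindFrom_bounds (t c : List Char) (start : Nat)
    (h : PySem.Chars.findFrom t c (start : Int) none ≠ -1) :
    start ≤ (PySem.Chars.findFrom t c (start : Int) none).toNat ∧
      (PySem.Chars.findFrom t c (start : Int) none).toNat ≤ t.length := by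
  by_cases hs : start ≤ t.length
  · have hr := PySem.Chars.findFrom_natCast t c start hs
    by_cases hr0 : PySem.Chars.find (t.drop start) c = -1
    · rw [hr, if_pos hr0] at h
      exact absurd rfl h
    · rw [hr, if_neg hr0]
      have hle := PySem.Chars.find_le_length (t.drop start) c
      have hge := PySem.Chars.neg_one_le_find (t.drop start) c
      have hlen : (t.drop start).length = t.length - start := List.length_drop ..
      omega
  · exact absurd (pvFindFrom_of_gt t c start (by omega)) h

-- the while-True loop of A: find char from start_index, stop on -1, else record and restart at index+1
def pvLoopA (t c : List Char) (start : Nat) : List Int :=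
  if h : PySem.Chars.findFrom t c (start : Int) none = -1 then []
  else PySem.Chars.findFrom t c (start : Int) none ::
    pvLoopA t c ((PySem.Chars.findFrom t c (start : Int) none).toNat + 1)
termination_by t.length + 1 - start
decreasing_by
  have := pvFindFrom_bounds t c start h
  omega

def find_all_occurrences_loop (text : String) (char : String) : List Int :=
  pvLoopA text.toList char.toList 0

-- ===== PORT B =====
-- text[i:i+n] with 0 ≤ i is PySem slicing on the code points (exact on this domain).
def find_all_occurrences_loop_alt (text : String) (char : String) : List Int :=
  (PySem.List.pyRange 0 (text.toList.length : Int) 1).filter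
    (fun i => decide (PySem.List.slice text.toList (some i) (some (i + (char.toList.length : Int))) = char.toList))

-- ===== PRECONDITION & SPEC =====
-- Pre_ excludes the empty search string, a corner where the number of 'occurrences' is pure
-- convention: A returns every index 0..len(text) including the one past the end, B returns 0..len(text)-1.
def Pre_find_all_occurrences_loop (text : String) (char : String) : Prop := char ≠ ""
instance (text : String) (char : String) : Decidable (Pre_find_all_occurrences_loop text char) := by unfold Pre_find_all_occurrences_loop; infer_instance
def pvWitness_find_all_occurrences_loop : String × String := ("hello", "l")
def Spec_find_all_occurrences_loop (text : String) (char : String) (out : List Int) : Prop := out = find_all_occurrences_loop_alt text char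
instance (text : String) (char : String) (out : List Int) : Decidable (Spec_find_all_occurrences_loop text char out) := by unfold Spec_find_all_occurrences_loop; infer_instance

-- ===== CLAIM =====
def Claim_equal_find_all_occurrences_loop : Prop := ∀ (text : String) (char : String), Dom_find_all_occurrences_loop text char → Pre_find_all_occurrences_loop text char → Spec_find_all_occurrences_loop text char (find_all_occurrences_loop text char)

-- ===== LEMMAS AND PROOFS =====

-- no position in [start, n] matches when findFrom from start fails
theorem pvNoMatch (t c : List Char) (start : Nat) (hs : start ≤ t.length)
    (h : PySem.Chars.findFrom t c (start : Int) none = -1) :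
    ∀ k, start ≤ k → ¬ c <+: t.drop k := by
  intro k hk hpre
  have hninf : ¬ c <:+: t.drop start := (PySem.Chars.findFrom_natCast_eq_neg_one_iff t c start hs).mp h
  apply hninf
  have hpre' : c <+: (t.drop start).drop (k - start) := by
    rw [List.drop_drop]
    rw [show start + (k - start) = k by omega]
    exact hpre
  have hiff := PySem.Chars.exists_prefix_drop_iff_isIn c (t.drop start)
  rw [PySem.Chars.isIn_iff_infix] at hiff
  exact hiff.mp ⟨k - start, hpre'⟩

-- characterisation of A's loop as a filtered index range
theorem pvLoopA_eq (t c : List Char) (start : Nat) :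
    pvLoopA t c start =
      ((List.range' start (t.length + 1 - start)).filter
        (fun k => PySem.Chars.startswith (t.drop k) c)).map (fun (k : Nat) => (k : Int)) := by
  induction start using pvLoopA.induct (t := t) (c := c) with
  | case1 start h =>
    rw [pvLoopA]
    simp only [h, dite_true]
    symm
    rw [List.map_eq_nil_iff, List.filter_eq_nil_iff]
    intro k hk hp
    rw [List.mem_range'_1] at hk
    by_cases hs : start ≤ t.length
    · exact pvNoMatch t c start hs h k hk.1 ((PySem.Chars.startswith_iff _ _).mp hp)
    · omega
  | case2 start h ih =>
    have hb := pvFindFrom_bounds t c start h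
    have hs : start ≤ t.length := by
      by_contra hgt
      exact h (pvFindFrom_of_gt t c start (by omega))
    obtain ⟨h1, h2, h3⟩ := PySem.Chars.findFrom_natCast_spec t c start hs h
    rw [pvLoopA]
    simp only [h, dite_false]
    rw [ih]
    have hidxm : PySem.Chars.findFrom t c (start : Int) none
        = ((PySem.Chars.findFrom t c (start : Int) none).toNat : Int) := by omega
    set m := (PySem.Chars.findFrom t c (start : Int) none).toNat with hm
    have hsplit : List.range' start (t.length + 1 - start)
        = List.range' start (m - start) ++ List.range' m ((t.length - m) + 1) := by
      have := List.range'_append (s := start) (m := m - start) (n := (t.length - m) + 1) (step := 1)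
      rw [show start + 1 * (m - start) = m by omega] at this
      rw [this, show m - start + (t.length - m + 1) = t.length + 1 - start by omega]
    rw [hsplit, List.filter_append, List.range'_succ, List.map_append]
    have hfst : List.filter (fun k => PySem.Chars.startswith (t.drop k) c) (List.range' start (m - start)) = [] := by
      rw [List.filter_eq_nil_iff]
      intro k hk hp
      rw [List.mem_range'_1] at hk
      exact h3 k hk.1 (by omega) ((PySem.Chars.startswith_iff _ _).mp hp)
    have hpm : PySem.Chars.startswith (t.drop m) c = true := (PySem.Chars.startswith_iff _ _).mpr h2
    rw [hfst]
    simp only [List.filter_cons, hpm, if_true, List.map_nil, List.nil_append, List.map_cons]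
    rw [show t.length - m = t.length + 1 - (m + 1) by omega]
    exact congrArg (fun l => _ :: l) rfl |>.trans (by rw [hidxm])

-- pointwise: startswith (t.drop k) c is the slice comparison t[k:k+|c|] = c
theorem pvStartswith_eq_slice (t c : List Char) (k : Nat) :
    PySem.Chars.startswith (t.drop k) c
      = decide (PySem.List.slice t (some (k : Int)) (some ((k : Int) + (c.length : Int))) = c) := by
  rw [PySem.List.slice_natCast_add]
  by_cases hp : c <+: t.drop k
  · rw [(PySem.Chars.startswith_iff _ _).mpr hp, eq_comm, decide_eq_true_iff]
    exact (List.prefix_iff_eq_take.mp hp).symm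
  · have : PySem.Chars.startswith (t.drop k) c = false := by
      cases hb : PySem.Chars.startswith (t.drop k) c
      · rfl
      · exact absurd ((PySem.Chars.startswith_iff _ _).mp hb) hp
    rw [this, eq_comm, decide_eq_false_iff_not]
    intro he
    exact hp (he ▸ List.take_prefix _ _)

theorem find_all_occurrences_loop_spec : Claim_equal_find_all_occurrences_loop := by
  intro text char _ hpre
  unfold Spec_find_all_occurrences_loop
  unfold find_all_occurrences_loop find_all_occurrences_loop_alt
  have hc : char.toList ≠ [] := by
    intro h
    exact hpre (by rwa [← String.toList_eq_nil_iff])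
  rw [pvLoopA_eq, PySem.List.pyRange_one]
  rw [show (((text.toList.length : Int)) - 0).toNat = text.toList.length by omega]
  rw [List.filter_map, Nat.sub_zero, List.range_eq_range']
  -- drop the last index of A's range: startswith at t.length is false for nonempty c
  have hlast : PySem.Chars.startswith (text.toList.drop text.toList.length) char.toList = false := by
    rw [List.drop_length]
    cases hb : PySem.Chars.startswith [] char.toList
    · rfl
    · exact absurd (List.prefix_nil.mp ((PySem.Chars.startswith_iff _ _).mp hb)) hc
  rw [show List.range' 0 (text.toList.length + 1) = List.range' 0 text.toList.length ++ [text.toList.length] by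
        rw [List.range'_1_concat, Nat.zero_add]]
  rw [List.filter_append]
  simp only [List.filter_cons, hlast, Bool.false_eq_true, if_false, List.filter_nil, List.append_nil,
    zero_add]
  congr 1
  apply List.filter_congr
  intro k _
  exact pvStartswith_eq_slice text.toList char.toList k
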